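-- pv_equiv track=rewrite | github.com/rootCircle/her.ai | whatrag/chat_utils/__init__.py | detect_responder
-- ===== SOURCE A (Python) =====
-- def detect_participants(parsed: list[tuple[str, str]]) -> list[str]:
--     """Get list of participants sorted by message count."""
--     seen: dict[str, int] = {}
--     for sender, _ in parsed:
--         seen[sender] = seen.get(sender, 0) + 1
--     return sorted(seen.keys(), key=lambda k: seen[k], reverse=True)
--
-- def detect_responder(parsed: list[tuple[str, str]], sender_name: str) -> str:
--     """The responder is whoever in the chat is NOT the sender."""
--     participants = detect_participants(parsed)
--     others = [p for p in participants if p != sender_name]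
--     if not others:
--         raise ValueError(
--             f"Could not find a responder. SENDER_NAME='{sender_name}' "
--             f"but participants are: {participants}"
--         )
--     return others[0]
-- ===== SOURCE B (Python) =====
-- def detect_responder(parsed: list[tuple[str, str]], sender_name: str) -> str:
--     """The responder is whoever in the chat is NOT the sender.
--
--     One linear pass over the per-sender message counts instead of sorting:
--     keep the first non-sender participant, replacing it only on a strictly
--     greater count (= the stable descending sort's tie-break).
--     """
--     seen: dict[str, int] = {}
--     for sender, _ in parsed:
--         seen[sender] = seen.get(sender, 0) + 1
--     best = None  # (name, count) of the best non-sender seen so far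
--     for name, count in seen.items():
--         if name == sender_name:
--             continue
--         if best is None or count > best[1]:
--             best = (name, count)
--     if best is None:
--         participants = list(seen)
--         raise ValueError(
--             f"Could not find a responder. SENDER_NAME='{sender_name}' "
--             f"but participants are: {participants}"
--         )
--     return best[0]
-- ===== Notes on version B (the rewrite author's own statement) =====
-- stated objective: simpler
-- what changed: Replaces the stable descending sort of all participants followed by a filter and first-element pick with a single linear pass over the count dict that keeps the first non-sender entry and replaces it only on a strictly greater count (same tie-break as the stable sort).
import Mathlib
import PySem

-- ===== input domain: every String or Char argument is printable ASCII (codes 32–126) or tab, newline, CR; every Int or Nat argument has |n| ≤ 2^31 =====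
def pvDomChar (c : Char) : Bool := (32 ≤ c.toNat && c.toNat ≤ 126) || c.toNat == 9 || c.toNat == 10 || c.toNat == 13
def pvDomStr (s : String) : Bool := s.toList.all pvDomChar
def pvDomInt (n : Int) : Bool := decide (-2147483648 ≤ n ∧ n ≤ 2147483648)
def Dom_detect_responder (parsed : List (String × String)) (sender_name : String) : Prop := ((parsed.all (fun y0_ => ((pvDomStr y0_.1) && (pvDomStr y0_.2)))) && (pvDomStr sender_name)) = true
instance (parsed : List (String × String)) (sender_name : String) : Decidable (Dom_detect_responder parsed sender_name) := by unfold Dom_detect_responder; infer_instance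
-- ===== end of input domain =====

-- B replaces A's stable descending sort + filter + first pick by one linear pass over the
-- count dict keeping the first strictly-best non-sender entry (objective: simpler).

-- ===== PORT A =====
def detect_participants (parsed : List (String × String)) : List String :=
  let seen : PySem.Dict String Int :=
    parsed.foldl (fun d p => d.insert p.1 (d.getD p.1 0 + 1)) PySem.Dict.empty
  -- seen[k] in the key lambda: k is always a key of seen, so getD _ 0 is exact
  PySem.List.sorted seen.keys (fun k => seen.getD k 0) true

def detect_responder (parsed : List (String × String)) (sender_name : String) : String :=
  let participants := detect_participants parsed
  let others := participants.filter (fun p => p != sender_name)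
  match others with
  | [] => ""          -- Python raises ValueError here; excluded by Pre_
  | o :: _ => o       -- others[0]

-- ===== PORT B =====
def detect_responder_alt (parsed : List (String × String)) (sender_name : String) : String :=
  let seen : PySem.Dict String Int :=
    parsed.foldl (fun d p => d.insert p.1 (d.getD p.1 0 + 1)) PySem.Dict.empty
  let best := seen.items.foldl (fun best kv =>
      if kv.1 == sender_name then best
      else
        match best with
        | none => some kv
        | some b => if kv.2 > b.2 then some kv else best) (none : Option (String × Int))
  match best with
  | some b => b.1
  | none => ""        -- Python raises ValueError here; excluded by Pre_

-- ===== PRECONDITION & SPEC =====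
-- Pre_ excludes exactly the inputs on which A raises ValueError: no message from anyone
-- other than sender_name (then there is no responder).
def Pre_detect_responder (parsed : List (String × String)) (sender_name : String) : Prop :=
  ∃ p ∈ parsed, p.1 ≠ sender_name
instance (parsed : List (String × String)) (sender_name : String) : Decidable (Pre_detect_responder parsed sender_name) := by unfold Pre_detect_responder; infer_instance
def pvWitness_detect_responder : (List (String × String)) × String :=
  ([("alice", "hi"), ("bob", "yo"), ("alice", "sup")], "alice")

def Spec_detect_responder (parsed : List (String × String)) (sender_name : String) (out : String) : Prop := out = detect_responder_alt parsed sender_name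
instance (parsed : List (String × String)) (sender_name : String) (out : String) : Decidable (Spec_detect_responder parsed sender_name out) := by unfold Spec_detect_responder; infer_instance

-- ===== CLAIM (what is proved, stated in full; the proofs are below) =====
def Claim_equal_detect_responder : Prop := ∀ (parsed : List (String × String)) (sender_name : String), Dom_detect_responder parsed sender_name → Pre_detect_responder parsed sender_name → Spec_detect_responder parsed sender_name (detect_responder parsed sender_name)

-- ===== LEMMAS AND PROOFS =====

-- the selection step of B, on bare keys (proof-only helper)
def gsel (cnt : String → Int) (s : String) (best : Option String) (k : String) : Option String :=
  if k == s then best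
  else
    match best with
    | none => some k
    | some b => if cnt k > cnt b then some k else best

theorem insertBy_split {α : Type} (before : α → α → Bool) (x : α) (l : List α) :
    ∃ l₁ l₂, l = l₁ ++ l₂ ∧ PySem.List.insertBy before x l = l₁ ++ x :: l₂ ∧
      (∀ y ∈ l₁, before x y = false) ∧ (∀ z, l₂.head? = some z → before x z = true) := by
  induction l with
  | nil => exact ⟨[], [], rfl, rfl, by simp, by simp⟩
  | cons y ys ih =>
    by_cases h : before x y = true
    · exact ⟨[], y :: ys, rfl, by simp [PySem.List.insertBy, h], by simp, by simp [h]⟩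
    · obtain ⟨m₁, m₂, he, hi, h₁, h₂⟩ := ih
      refine ⟨y :: m₁, m₂, by simp [he], ?_, ?_, h₂⟩
      · simp [PySem.List.insertBy, h, hi]
      · intro z hz
        rcases List.mem_cons.1 hz with rfl | hz
        · simpa using h
        · exact h₁ z hz

-- head of the filtered list after one stable descending insertion = one B-selection step
theorem head_filter_insertBy (cnt : String → Int) (s x : String) (l : List String)
    (hp : l.Pairwise (fun a b => cnt b ≤ cnt a)) :
    ((PySem.List.insertBy (fun a b => decide (cnt b < cnt a)) x l).filter (fun k => k != s)).head?
      = gsel cnt s ((l.filter (fun k => k != s)).head? ) x := by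
  obtain ⟨l₁, l₂, he, hi, h₁, h₂⟩ :=
    insertBy_split (fun a b => decide (cnt b < cnt a)) x l
  subst he
  rw [hi]
  by_cases hx : x == s
  · have hpx' : (x != s) = false := by simp [bne, hx]
    simp [gsel, hx, List.filter_append, hpx']
  · have hpx : (x != s) = true := by simp [bne, hx]
    rcases hf : l₁.filter (fun k => k != s) with _ | ⟨c, cs⟩
    · -- nothing from l₁ survives the filter: x is the head
      rcases hg : (l₂.filter (fun k => k != s)).head? with _ | c
      · simp [gsel, hx, List.filter_append, hf, hpx, hg]
      · -- c ∈ l₂, so cnt c < cnt x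
        have hcmem : c ∈ l₂.filter (fun k => k != s) := by
          cases hfl : l₂.filter (fun k => k != s) with
          | nil => simp [hfl] at hg
          | cons a t => simp [hfl] at hg; simp [hg]
        have hcl₂ : c ∈ l₂ := List.mem_of_mem_filter hcmem
        obtain ⟨z, t, rfl⟩ : ∃ z t, l₂ = z :: t := by
          cases l₂ with
          | nil => simp at hcl₂
          | cons z t => exact ⟨z, t, rfl⟩
        have hz : cnt z < cnt x := by simpa using h₂ z rfl
        have hct : cnt c ≤ cnt z := by
          rcases List.mem_cons.1 hcl₂ with rfl | hct
          · exact le_refl _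
          · have := (List.pairwise_append.1 hp).2.1
            exact (List.pairwise_cons.1 this).1 c hct
        have : cnt x > cnt c := lt_of_le_of_lt hct hz
        simp [gsel, hx, List.filter_append, hf, hpx, hg, this]
    · -- head of the filtered l₁ stays: cnt x ≤ cnt c
      have hcf : c ∈ List.filter (fun k => k != s) l₁ := by
        rw [hf]; exact List.mem_cons_self ..
      have hcl₁ : c ∈ l₁ := List.mem_of_mem_filter hcf
      have hxc : ¬ (cnt x > cnt c) := by
        have := h₁ c hcl₁
        simp at this
        omega
      simp [gsel, hx, List.filter_append, hf, hpx, hxc]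

theorem insertBy_head_fold (cnt : String → Int) (s : String) :
    ∀ (L ys : List String),
      ((List.foldl (fun acc x => PySem.List.insertBy (fun a b => decide (cnt b < cnt a)) x acc)
          (PySem.List.sorted ys cnt true) L).filter (fun k => k != s)).head?
        = L.foldl (gsel cnt s) (((PySem.List.sorted ys cnt true).filter (fun k => k != s)).head?) := by
  intro L
  induction L with
  | nil => intro ys; simp
  | cons x L ih =>
    intro ys
    have hs : PySem.List.insertBy (fun a b => decide (cnt b < cnt a)) x (PySem.List.sorted ys cnt true)
        = PySem.List.sorted (ys ++ [x]) cnt true := by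
      rw [PySem.List.sorted_rev_eq_foldl_insertBy, PySem.List.sorted_rev_eq_foldl_insertBy,
        List.foldl_append]
      rfl
    have hstep := head_filter_insertBy cnt s x (PySem.List.sorted ys cnt true)
      (PySem.List.sorted_pairwise_rev ys cnt)
    calc ((List.foldl _ (PySem.List.sorted ys cnt true) (x :: L)).filter (fun k => k != s)).head?
        = ((List.foldl (fun acc x => PySem.List.insertBy (fun a b => decide (cnt b < cnt a)) x acc)
            (PySem.List.sorted (ys ++ [x]) cnt true) L).filter (fun k => k != s)).head? := by
          rw [List.foldl_cons, hs]
      _ = L.foldl (gsel cnt s) (((PySem.List.sorted (ys ++ [x]) cnt true).filter (fun k => k != s)).head?) := ih (ys ++ [x])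
      _ = (x :: L).foldl (gsel cnt s) (((PySem.List.sorted ys cnt true).filter (fun k => k != s)).head?) := by
          rw [List.foldl_cons, ← hs, hstep]

-- A's selection equals B's fold, on bare keys
theorem sorted_filter_head_eq_fold (cnt : String → Int) (s : String) (L : List String) :
    ((PySem.List.sorted L cnt true).filter (fun k => k != s)).head?
      = L.foldl (gsel cnt s) none := by
  have := insertBy_head_fold cnt s L []
  rw [PySem.List.sorted_rev_eq_foldl_insertBy]
  simpa using this

-- B's fold over (key, count) pairs tracks the bare-key fold
theorem foldl_pair_eq (cnt : String → Int) (s : String) :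
    ∀ (L : List String) (ob : Option String),
      L.foldl (fun best k =>
          if k == s then best
          else
            match best with
            | none => some (k, cnt k)
            | some b => if cnt k > b.2 then some (k, cnt k) else best)
        (ob.map (fun k => (k, cnt k)))
      = (L.foldl (gsel cnt s) ob).map (fun k => (k, cnt k)) := by
  intro L
  induction L with
  | nil => intro ob; rfl
  | cons x L ih =>
    intro ob
    rw [List.foldl_cons, List.foldl_cons]
    by_cases hx : x == s
    · simpa [gsel, hx] using ih ob
    · cases ob with
      | none =>
        have := ih (some x)
        simpa [gsel, hx] using this
      | some b =>
        by_cases hc : cnt x > cnt b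
        · have := ih (some x)
          simpa [gsel, hx, hc] using this
        · have := ih (some b)
          simpa [gsel, hx, hc] using this

theorem detect_responder_eq (parsed : List (String × String)) (s : String) :
    detect_responder parsed s = detect_responder_alt parsed s := by
  unfold detect_responder detect_responder_alt detect_participants
  have hseen : parsed.foldl (fun d p => d.insert p.1 (d.getD p.1 0 + 1)) PySem.Dict.empty
      = PySem.Dict.counter (parsed.map Prod.fst) := by
    rw [← PySem.Dict.foldl_insert_getD_add_one_eq_counter, List.foldl_map]
  rw [hseen]
  simp only [PySem.Dict.keys_counter, PySem.Dict.items_counter, PySem.Dict.getD_counter]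
  rw [List.foldl_map]
  have hmain := sorted_filter_head_eq_fold (fun k => ((parsed.map Prod.fst).count k : Int)) s
    (PySem.Set.ofList (parsed.map Prod.fst))
  have hpair := foldl_pair_eq (fun k => ((parsed.map Prod.fst).count k : Int)) s
    (PySem.Set.ofList (parsed.map Prod.fst)) none
  simp only [Option.map_none] at hpair
  rw [hpair, ← hmain]
  cases hl : List.filter (fun p => p != s)
      (PySem.List.sorted (PySem.Set.ofList (parsed.map Prod.fst))
        (fun k => ((parsed.map Prod.fst).count k : Int)) true) with
  | nil => rfl
  | cons o t => rfl

-- ===== VERDICT (by name: the statement is the Claim_ definition above) =====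
theorem detect_responder_spec : Claim_equal_detect_responder := by
  intro parsed sender_name _ _
  unfold Spec_detect_responder
  exact detect_responder_eq parsed sender_name
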